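-- pv_equiv track=rewrite | github.com/Alset-Nikolas/YandexAlgorithmTraining5 | sobes/2.py | bin_search_first_key
-- ===== SOURCE A (Python) =====
-- def bin_search_first_key(mass: list, key: str):
-- 	l = 0
-- 	r = len(mass) - 1
-- 	result = -1
-- 	while l <= r:
-- 		m = (l + r) // 2
-- 		if mass[m].startswith(key):
-- 			r = m - 1
-- 			result = m
-- 		elif mass[m] < key:
-- 			l = m + 1
-- 		else:
-- 			r = m - 1
-- 	return result
-- ===== SOURCE B (Python) =====
-- def bin_search_first_key(mass: list, key: str):
--     # Linear scan: return the index of the first element carrying the prefix.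
--     # On a sorted list this is exactly A's answer, since any element with
--     # prefix `key` compares >= key, so no match can precede the first one.
--     for i, s in enumerate(mass):
--         if s.startswith(key):
--             return i
--     return -1
-- ===== Notes on version B (the rewrite author's own statement) =====
-- stated objective: simpler
-- what changed: A runs a three-branch binary search over l..r, recording candidate indices with an inline startswith test; B abandons binary search entirely and does a single left-to-right linear scan returning the first index whose element starts with key (no lexicographic comparisons at all), correct on sorted input because a prefix match compares >= key so the first match is A's recorded lower bound. Pre_ excludes only unsorted lists that contain a prefix match, where A's index is an accident of probe order.
-- outside the precondition, e.g. on bin_search_first_key(['b', 'a'], 'a'): A returns -1, B returns 1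
import Mathlib
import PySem

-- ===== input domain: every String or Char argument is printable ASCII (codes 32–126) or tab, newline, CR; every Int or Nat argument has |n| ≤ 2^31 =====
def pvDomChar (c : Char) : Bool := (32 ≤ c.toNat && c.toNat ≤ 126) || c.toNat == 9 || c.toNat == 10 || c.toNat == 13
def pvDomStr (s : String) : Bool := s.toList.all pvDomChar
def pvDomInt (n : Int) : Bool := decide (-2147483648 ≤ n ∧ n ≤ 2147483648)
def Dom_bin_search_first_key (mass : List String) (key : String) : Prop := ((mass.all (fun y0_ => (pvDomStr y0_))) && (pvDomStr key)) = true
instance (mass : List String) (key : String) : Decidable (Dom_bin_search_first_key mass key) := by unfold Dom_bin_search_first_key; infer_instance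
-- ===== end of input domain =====

-- B drops A's binary search entirely: a single left-to-right scan returning the first index
-- whose element starts with key (objective: simpler).

-- termination helper for A's loop: l ≤ r → l ≤ (l+r)//2 ≤ r (floor division)
theorem pv_fd2_bounds (l r : Int) (h : l ≤ r) :
    l ≤ PySem.Int.floordiv (l + r) 2 ∧ PySem.Int.floordiv (l + r) 2 ≤ r := by
  have h2 := (PySem.Int.floordiv_eq_iff_of_pos (a := l + r) (b := 2)
    (q := PySem.Int.floordiv (l + r) 2) (by norm_num)).mp rfl
  omega

-- ===== PORT A =====
-- the while loop of A, state (l, r, result)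
def binLoopA (mass : List String) (key : String) (l r res : Int) : Int :=
  if h : l ≤ r then
    -- m = (l + r) // 2 ; mass[m] is always in range when reached (0 ≤ l, r ≤ len-1)
    if PySem.Str.startswith (PySem.List.pyGetD mass (PySem.Int.floordiv (l + r) 2) "") key then
      binLoopA mass key l (PySem.Int.floordiv (l + r) 2 - 1) (PySem.Int.floordiv (l + r) 2)
    else if PySem.List.pyGetD mass (PySem.Int.floordiv (l + r) 2) "" < key then
      binLoopA mass key (PySem.Int.floordiv (l + r) 2 + 1) r res
    else
      binLoopA mass key l (PySem.Int.floordiv (l + r) 2 - 1) res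
  else res
termination_by (r + 1 - l).toNat
decreasing_by
  · have := pv_fd2_bounds l r h; omega
  · have := pv_fd2_bounds l r h; omega
  · have := pv_fd2_bounds l r h; omega

def bin_search_first_key (mass : List String) (key : String) : Int :=
  binLoopA mass key 0 ((mass.length : Int) - 1) (-1)

-- ===== PORT B =====
-- B's for-loop over enumerate(mass): first index whose element starts with key, else -1
def scanB (mass : List String) (key : String) (i : Int) : Int :=
  match mass with
  | [] => -1
  | s :: rest => if PySem.Str.startswith s key then i else scanB rest key (i + 1)

def bin_search_first_key_alt (mass : List String) (key : String) : Int :=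
  scanB mass key 0

-- ===== PRECONDITION & SPEC =====
-- Pre_ admits every sorted (non-decreasing) list, and also every list — sorted or not — in
-- which no element starts with key (both programs then return -1); it excludes only unsorted
-- lists containing a prefix match, where A's returned index is an accident of which elements
-- the binary-search probe order happens to visit — a corner no re-implementation should specify.
def Pre_bin_search_first_key (mass : List String) (key : String) : Prop :=
  mass.Pairwise (· ≤ ·) ∨ (∀ s ∈ mass, PySem.Str.startswith s key = false)
instance (mass : List String) (key : String) : Decidable (Pre_bin_search_first_key mass key) := by
  unfold Pre_bin_search_first_key; infer_instance

def pvWitness_bin_search_first_key : List String × String := (["ab"], "a")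

def Spec_bin_search_first_key (mass : List String) (key : String) (out : Int) : Prop :=
  out = bin_search_first_key_alt mass key
instance (mass : List String) (key : String) (out : Int) : Decidable (Spec_bin_search_first_key mass key out) := by
  unfold Spec_bin_search_first_key; infer_instance

-- ===== CLAIM (what is proved, stated in full; the proofs are below) =====
def Claim_equal_bin_search_first_key : Prop := ∀ (mass : List String) (key : String), Dom_bin_search_first_key mass key → Pre_bin_search_first_key mass key → Spec_bin_search_first_key mass key (bin_search_first_key mass key)

-- ===== LEMMAS AND PROOFS =====

-- lexicographic order vs prefixes, on List Char
theorem pv_prefix_not_lt (p s : List Char) (h : p <+: s) : ¬ s < p := by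
  induction p generalizing s with
  | nil => intro hlt; cases hlt
  | cons c p' ih =>
    obtain ⟨t, rfl⟩ := h
    intro hlt
    rcases List.cons_lex_cons_iff.mp hlt with hc | ⟨_, hlt'⟩
    · exact lt_irrefl _ hc
    · exact ih (p' ++ t) ⟨t, rfl⟩ hlt'

theorem pv_prefix_le (p s : List Char) (h : p <+: s) : p ≤ s :=
  not_lt.mp (pv_prefix_not_lt p s h)

theorem pv_prefix_sandwich (k s t : List Char) (hk : k <+: t) (h1 : k ≤ s) (h2 : s ≤ t) :
    k <+: s := by
  induction k generalizing s t with
  | nil => exact List.nil_prefix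
  | cons c k' ih =>
    obtain ⟨u, rfl⟩ := hk
    cases s with
    | nil => exact absurd (List.nil_lt_cons c k') (not_lt.mpr h1)
    | cons d s' =>
      have h1' := not_lt.mpr h1
      have h2' := not_lt.mpr h2
      by_cases hcd : d = c
      · subst hcd
        have hs'k' : k' ≤ s' := not_lt.mp (fun hl => h1' (List.cons_lex_cons_iff.mpr (Or.inr ⟨rfl, hl⟩)))
        have hs't' : s' ≤ k' ++ u := not_lt.mp (fun hl => h2' (List.cons_lex_cons_iff.mpr (Or.inr ⟨rfl, hl⟩)))
        exact List.cons_prefix_cons.mpr ⟨rfl, ih s' (k' ++ u) ⟨u, rfl⟩ hs'k' hs't'⟩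
      · rcases lt_trichotomy c d with hlt | heq | hgt
        · exact absurd (List.cons_lex_cons_iff.mpr (Or.inl hlt)) h2'
        · exact absurd heq.symm hcd
        · exact absurd (List.cons_lex_cons_iff.mpr (Or.inl hgt)) h1'

-- the same facts on String (Python's s.startswith(key) and s < key)
theorem pv_startswith_le (s key : String) (h : PySem.Str.startswith s key = true) : key ≤ s :=
  String.le_iff_toList_le.mpr
    (pv_prefix_le _ _ ((PySem.Chars.startswith_iff s.toList key.toList).mp h))

theorem pv_startswith_sandwich (s t key : String) (h : PySem.Str.startswith t key = true)
    (h1 : key ≤ s) (h2 : s ≤ t) : PySem.Str.startswith s key = true :=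
  (PySem.Chars.startswith_iff s.toList key.toList).mpr
    (pv_prefix_sandwich _ _ _ ((PySem.Chars.startswith_iff t.toList key.toList).mp h)
      (String.le_iff_toList_le.mp h1) (String.le_iff_toList_le.mp h2))

-- sorted access is monotone
theorem pv_sorted_mono (mass : List String) (hs : mass.Pairwise (· ≤ ·))
    (i j : Nat) (hij : i ≤ j) (hj : j < mass.length) :
    mass[i]'(lt_of_le_of_lt hij hj) ≤ mass[j] := by
  rcases lt_or_eq_of_le hij with h | h
  · exact (List.pairwise_iff_getElem.mp hs) i j _ hj h
  · subst h; exact le_rfl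

-- A's loop: if k is a lower-bound position (everything left is < key, everything from k on
-- is ≥ key) then A returns k when mass[k] carries the prefix, and -1 otherwise.
theorem pv_aloop_spec (mass : List String) (key : String) (hs : mass.Pairwise (· ≤ ·))
    (k : Int) (hk0 : 0 ≤ k) (hkn : k ≤ (mass.length : Int))
    (hkl : ∀ (j : Nat) (hj : j < mass.length), (j : Int) < k → mass[j] < key)
    (hkr : ∀ (j : Nat) (hj : j < mass.length), k ≤ (j : Int) → key ≤ mass[j]) :
    ∀ (N : Nat) (l r res : Int), (r + 1 - l).toNat ≤ N → 0 ≤ l → r < (mass.length : Int) →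
    (∀ (j : Nat) (hj : j < mass.length), (j : Int) < l → mass[j] < key) →
    ((k < (mass.length : Int) ∧ PySem.Str.startswith (PySem.List.pyGetD mass k "") key = true) →
      (k ≤ r ∨ res = k)) →
    (¬ (k < (mass.length : Int) ∧ PySem.Str.startswith (PySem.List.pyGetD mass k "") key = true) →
      res = -1) →
    binLoopA mass key l r res =
      (if k < (mass.length : Int) ∧ PySem.Str.startswith (PySem.List.pyGetD mass k "") key = true
       then k else -1) := by
  intro N
  induction N with
  | zero =>
    intro l r res hN h0 hr hleft hresP hresN
    rw [binLoopA]
    have hlr : ¬ l ≤ r := by omega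
    simp only [hlr, dite_false]
    by_cases hP : k < (mass.length : Int) ∧ PySem.Str.startswith (PySem.List.pyGetD mass k "") key = true
    · rcases hresP hP with hkr' | hres
      · exfalso
        have hkey : key ≤ mass[k.toNat]'(by omega) := hkr k.toNat (by omega) (by omega)
        exact absurd hkey (not_le.mpr (hleft k.toNat (by omega) (by omega)))
      · rw [if_pos hP]; exact hres
    · rw [if_neg hP]; exact hresN hP
  | succ N ih =>
    intro l r res hN h0 hr hleft hresP hresN
    rw [binLoopA]
    by_cases hlr : l ≤ r
    · simp only [hlr, dite_true]
      have hm := pv_fd2_bounds l r hlr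
      set m := PySem.Int.floordiv (l + r) 2 with hmdef
      have hm0 : 0 ≤ m := by omega
      have hmn : m < (mass.length : Int) := by omega
      have hget : PySem.List.pyGetD mass m "" = mass[m.toNat]'(by omega) :=
        PySem.List.pyGetD_eq_getElem mass "" hm0 hmn
      by_cases hsw : PySem.Str.startswith (PySem.List.pyGetD mass m "") key = true
      · simp only [hsw, if_true]
        have hkm : k ≤ m := by
          by_contra hc
          have : mass[m.toNat]'(by omega) < key := hkl m.toNat (by omega) (by omega)
          exact absurd (pv_startswith_le _ _ (hget ▸ hsw)) (not_le.mpr this)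
        have hkn' : k < (mass.length : Int) := by omega
        have hgetk : PySem.List.pyGetD mass k "" = mass[k.toNat]'(by omega) :=
          PySem.List.pyGetD_eq_getElem mass "" hk0 hkn'
        have hswk : PySem.Str.startswith (PySem.List.pyGetD mass k "") key = true := by
          rw [hgetk]
          refine pv_startswith_sandwich _ (mass[m.toNat]'(by omega)) key (hget ▸ hsw)
            (hkr k.toNat (by omega) (by omega)) ?_
          exact pv_sorted_mono mass hs k.toNat m.toNat (by omega) (by omega)
        refine ih l (m - 1) m (by omega) h0 (by omega) hleft ?_ ?_
        · intro _; by_cases hkm' : k ≤ m - 1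
          · exact Or.inl hkm'
          · exact Or.inr (by omega)
        · intro hP; exact absurd ⟨hkn', hswk⟩ hP
      · rw [if_neg hsw]
        by_cases hc : PySem.List.pyGetD mass m "" < key
        · simp only [hc, if_true]
          refine ih (m + 1) r res (by omega) (by omega) hr ?_ hresP hresN
          intro j hj hjm
          have : mass[j] ≤ mass[m.toNat]'(by omega) := pv_sorted_mono mass hs j m.toNat (by omega) (by omega)
          exact lt_of_le_of_lt this (hget ▸ hc)
        · simp only [hc, if_false]
          have hkm : k ≤ m := by
            by_contra hcc
            have : mass[m.toNat]'(by omega) < key := hkl m.toNat (by omega) (by omega)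
            exact absurd (hget ▸ this) hc
          refine ih l (m - 1) res (by omega) h0 (by omega) hleft ?_ hresN
          intro hP
          have hkm' : k ≠ m := by
            intro he
            rw [he] at hP
            exact hsw hP.2
          rcases hresP hP with _ | hres
          · exact Or.inl (by omega)
          · exact Or.inr hres
    · simp only [hlr, dite_false]
      by_cases hP : k < (mass.length : Int) ∧ PySem.Str.startswith (PySem.List.pyGetD mass k "") key = true
      · rcases hresP hP with hkr' | hres
        · exfalso
          have hkey : key ≤ mass[k.toNat]'(by omega) := hkr k.toNat (by omega) (by omega)
          exact absurd hkey (not_le.mpr (hleft k.toNat (by omega) (by omega)))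
        · rw [if_pos hP]; exact hres
      · rw [if_neg hP]; exact hresN hP

-- with no prefix match anywhere, A's result variable is never written
theorem pv_aloop_nomatch (mass : List String) (key : String)
    (hno : ∀ s ∈ mass, PySem.Str.startswith s key = false) :
    ∀ (N : Nat) (l r : Int), (r + 1 - l).toNat ≤ N → 0 ≤ l → r < (mass.length : Int) →
    binLoopA mass key l r (-1) = -1 := by
  intro N
  induction N with
  | zero =>
    intro l r hN h0 hr
    rw [binLoopA]
    simp only [show ¬ l ≤ r by omega, dite_false]
  | succ N ih =>
    intro l r hN h0 hr
    rw [binLoopA]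
    by_cases hlr : l ≤ r
    · simp only [hlr, dite_true]
      have hm := pv_fd2_bounds l r hlr
      set m := PySem.Int.floordiv (l + r) 2 with hmdef
      have hget : PySem.List.pyGetD mass m "" = mass[m.toNat]'(by omega) :=
        PySem.List.pyGetD_eq_getElem mass "" (by omega) (by omega)
      have hsw : ¬ PySem.Str.startswith (PySem.List.pyGetD mass m "") key = true := by
        rw [hget, hno _ (List.getElem_mem _)]; simp
      rw [if_neg hsw]
      by_cases hc : PySem.List.pyGetD mass m "" < key
      · rw [if_pos hc]; exact ih (m + 1) r (by omega) (by omega) hr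
      · rw [if_neg hc]; exact ih l (m - 1) (by omega) h0 (by omega)
    · simp only [hlr, dite_false]

-- B's scan with no match anywhere returns -1
theorem pv_scanB_nomatch (mass : List String) (key : String)
    (hno : ∀ s ∈ mass, PySem.Str.startswith s key = false) (i : Int) :
    scanB mass key i = -1 := by
  induction mass generalizing i with
  | nil => rfl
  | cons s rest ih =>
    simp only [scanB, hno s (List.mem_cons_self), Bool.false_eq_true, if_false]
    exact ih (fun t ht => hno t (List.mem_cons_of_mem _ ht)) (i + 1)

-- B's scan returns i + (index of the first match)
theorem pv_scanB_first (mass : List String) (key : String) (j : Nat) (hj : j < mass.length)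
    (hmatch : PySem.Str.startswith mass[j] key = true)
    (hfirst : ∀ (l : Nat) (hl : l < j), PySem.Str.startswith (mass[l]'(by omega)) key = false)
    (i : Int) : scanB mass key i = i + (j : Int) := by
  induction mass generalizing j i with
  | nil => exact absurd hj (Nat.not_lt_zero j)
  | cons s rest ih =>
    cases j with
    | zero =>
      simp only [List.getElem_cons_zero] at hmatch
      show (if PySem.Str.startswith s key then i else scanB rest key (i + 1)) = i + (0 : Nat)
      rw [if_pos hmatch]; simp
    | succ j' =>
      have hs : PySem.Str.startswith s key = false := hfirst 0 (Nat.succ_pos j')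
      simp only [scanB, hs, Bool.false_eq_true, if_false]
      have := ih j' (by simpa using hj)
        (by simpa using hmatch)
        (fun l hl => by simpa using hfirst (l + 1) (by omega)) (i + 1)
      rw [this]; push_cast; ring

-- ===== VERDICT (by name: the statement is the Claim_ definition above) =====
theorem bin_search_first_key_spec : Claim_equal_bin_search_first_key := by
  intro mass key _ hpre
  unfold Spec_bin_search_first_key bin_search_first_key bin_search_first_key_alt
  by_cases hex : ∃ j : Nat, j < mass.length ∧
      PySem.Str.startswith (PySem.List.pyGetD mass (j : Int) "") key = true
  · -- some element carries the prefix: both return the first match index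
    rcases hpre with hs | hno
    · classical
      let j := Nat.find hex
      obtain ⟨hjlt, hjm⟩ := Nat.find_spec hex
      have hjfirst : ∀ (l : Nat), l < j → ¬ (l < mass.length ∧
          PySem.Str.startswith (PySem.List.pyGetD mass (l : Int) "") key = true) :=
        fun l hl => Nat.find_min hex hl
      have hgetj : PySem.List.pyGetD mass (j : Int) "" = mass[j]'hjlt :=
        PySem.List.pyGetD_eq_getElem mass "" (by omega) (by exact_mod_cast hjlt)
      have hfirst' : ∀ (l : Nat) (hl : l < j), PySem.Str.startswith (mass[l]'(by omega)) key = false := by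
        intro l hl
        have hll : l < mass.length := by omega
        have hgetl : PySem.List.pyGetD mass (l : Int) "" = mass[l]'hll :=
          PySem.List.pyGetD_eq_getElem mass "" (by omega) (by exact_mod_cast hll)
        have := hjfirst l hl
        rw [hgetl] at this
        cases h : PySem.Str.startswith (mass[l]'hll) key
        · rfl
        · exact absurd ⟨hll, h⟩ this
      -- j is the lower-bound position
      have hkl : ∀ (jj : Nat) (hjj : jj < mass.length), (jj : Int) < (j : Int) → mass[jj] < key := by
        intro jj hjj hlt
        have hjjj : jj < j := by exact_mod_cast hlt
        by_contra hc
        have hle : key ≤ mass[jj] := not_lt.mp hc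
        have : PySem.Str.startswith mass[jj] key = true :=
          pv_startswith_sandwich _ (mass[j]'hjlt) key (hgetj ▸ hjm) hle
            (pv_sorted_mono mass hs jj j (by omega) hjlt)
        rw [hfirst' jj hjjj] at this
        exact Bool.false_ne_true this
      have hkr : ∀ (jj : Nat) (hjj : jj < mass.length), (j : Int) ≤ (jj : Int) → key ≤ mass[jj] := by
        intro jj hjj hle
        have hjjj : j ≤ jj := by exact_mod_cast hle
        exact le_trans (pv_startswith_le _ _ (hgetj ▸ hjm))
          (pv_sorted_mono mass hs j jj hjjj hjj)
      have hA := pv_aloop_spec mass key hs (j : Int) (by omega) (by exact_mod_cast le_of_lt hjlt)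
        hkl hkr (mass.length + 1) 0 ((mass.length : Int) - 1) (-1) (by omega) le_rfl (by omega)
        (fun jj hjj hjl => absurd hjl (by omega))
        (fun _ => Or.inl (by omega))
        (fun hP => absurd ⟨by exact_mod_cast hjlt, hjm⟩ hP)
      rw [hA, if_pos ⟨by exact_mod_cast hjlt, hjm⟩]
      rw [pv_scanB_first mass key j hjlt (hgetj ▸ hjm) hfirst' 0]
      ring
    · -- Pre_'s second disjunct contradicts the existence of a match
      exfalso
      obtain ⟨j, hjlt, hjm⟩ := hex
      have hgetj : PySem.List.pyGetD mass (j : Int) "" = mass[j]'hjlt :=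
        PySem.List.pyGetD_eq_getElem mass "" (by omega) (by exact_mod_cast hjlt)
      rw [hgetj, hno _ (List.getElem_mem _)] at hjm
      exact Bool.false_ne_true hjm
  · -- no element carries the prefix: both return -1
    have hno : ∀ s ∈ mass, PySem.Str.startswith s key = false := by
      intro s hsm
      obtain ⟨j, hjlt, rfl⟩ := List.getElem_of_mem hsm
      have hgetj : PySem.List.pyGetD mass (j : Int) "" = mass[j]'hjlt :=
        PySem.List.pyGetD_eq_getElem mass "" (by omega) (by exact_mod_cast hjlt)
      cases h : PySem.Str.startswith (mass[j]'hjlt) key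
      · rfl
      · exact absurd ⟨j, hjlt, hgetj ▸ h⟩ hex
    rw [pv_aloop_nomatch mass key hno (mass.length + 1) 0 ((mass.length : Int) - 1)
      (by omega) le_rfl (by omega)]
    rw [pv_scanB_nomatch mass key hno 0]
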